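-- pv_equiv track=rewrite | github.com/hyeyoon100/RePool | triplet_scorer.py | convert_span_triples_to_text
-- ===== SOURCE A (Python) =====
-- from typing import List, Tuple, Dict, Set
--
-- def convert_span_triples_to_text(triples: List[Tuple[int, int, int, str]],
--                                node_id_to_token: dict,
--                                span_id_to_token_indices: Dict[int, List[int]],
--                                num_tokens: int
--                             ) -> List[Tuple[str, str, str, str]]:
--     """
--     Convert span-level triples to text.
--
--     Args:
--         triples: List[Tuple[int, int, int, str]] - (head_id, rel_id, tail_id, rel_type)
--         node_id_to_token: dict - entity와 relation에 대한 매핑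
--         span_id_to_token_indices: Dict[int, List[int]] - span_id에 포함된 token indices
--         num_tokens: int - 개별 토큰의 수 (span 노드 제외)
--     """
--     converted_triples = []
--     for (h, r, t) in triples:
--         # head text 변환
--         if h < num_tokens:  # token node
--             h_text = node_id_to_token.get(h, f"UNK_{h}")
--         else:  # span node
--             token_indices = span_id_to_token_indices.get(h, [])
--             h_text = " ".join([node_id_to_token.get(idx, f"UNK_{idx}") for idx in token_indices])
--
--         # tail text 변환
--         if t < num_tokens:  # token node
--             t_text = node_id_to_token.get(t, f"UNK_{t}")
--         else:  # span node
--             token_indices = span_id_to_token_indices.get(t, [])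
--             t_text = " ".join([node_id_to_token.get(idx, f"UNK_{idx}") for idx in token_indices])
--
--         # relation text 변환
--         # relation 노드 id는 num_tokens ~ num_tokens+num_relations-1
--         r_text = node_id_to_token.get(r, f"UNK_{r}")
--
--         converted_triples.append((h_text, r_text, t_text))
--     return converted_triples
-- ===== SOURCE B (Python) =====
-- def convert_span_triples_to_text(triples, node_id_to_token, span_id_to_token_indices, num_tokens):
--     """Two-pass variant: first build an id -> text index over the distinct head/tail
--     node ids, then emit the output with O(1) table lookups (no inline re-resolution)."""
--     def resolve(i):
--         if i < num_tokens:
--             return node_id_to_token.get(i, f"UNK_{i}")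
--         return " ".join([node_id_to_token.get(idx, f"UNK_{idx}")
--                          for idx in span_id_to_token_indices.get(i, [])])
--
--     table = {}
--     for (h, r, t) in triples:
--         if h not in table:
--             table[h] = resolve(h)
--         if t not in table:
--             table[t] = resolve(t)
--
--     return [(table[h], node_id_to_token.get(r, f"UNK_{r}"), table[t])
--             for (h, r, t) in triples]
-- ===== Notes on version B (the rewrite author's own statement) =====
-- stated objective: alternative
-- what changed: B separates resolution from emission: a first pass builds an id->text index over the distinct head/tail ids (each id resolved once), then a second pass emits the triples via table lookups instead of resolving every head/tail inline as A does.
import Mathlib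
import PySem

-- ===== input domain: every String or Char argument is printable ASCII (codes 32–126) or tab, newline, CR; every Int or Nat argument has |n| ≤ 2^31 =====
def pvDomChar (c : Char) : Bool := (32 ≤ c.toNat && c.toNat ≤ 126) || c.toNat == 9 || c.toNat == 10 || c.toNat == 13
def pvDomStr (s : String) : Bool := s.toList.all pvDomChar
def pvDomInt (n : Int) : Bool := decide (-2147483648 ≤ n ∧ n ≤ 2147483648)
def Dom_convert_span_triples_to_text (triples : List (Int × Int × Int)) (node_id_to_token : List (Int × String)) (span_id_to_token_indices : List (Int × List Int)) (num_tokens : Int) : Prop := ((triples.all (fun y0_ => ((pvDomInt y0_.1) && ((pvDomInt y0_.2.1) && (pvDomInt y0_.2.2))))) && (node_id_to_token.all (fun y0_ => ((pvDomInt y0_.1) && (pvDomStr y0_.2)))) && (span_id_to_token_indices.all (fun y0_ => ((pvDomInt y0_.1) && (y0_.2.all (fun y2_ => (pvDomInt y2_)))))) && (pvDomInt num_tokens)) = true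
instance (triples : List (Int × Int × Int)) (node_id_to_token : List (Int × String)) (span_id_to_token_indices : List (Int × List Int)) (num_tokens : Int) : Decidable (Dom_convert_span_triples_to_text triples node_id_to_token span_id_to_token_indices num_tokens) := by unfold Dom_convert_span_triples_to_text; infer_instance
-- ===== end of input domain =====

-- B builds an id->text index over the distinct head/tail ids first, then emits the
-- triples with table lookups; A resolves every occurrence inline (objective: alternative).

-- ===== PORT A =====
-- A resolves head/tail/relation text inline for every triple and appends.
def convert_span_triples_to_text (triples : List (Int × Int × Int)) (node_id_to_token : List (Int × String)) (span_id_to_token_indices : List (Int × List Int)) (num_tokens : Int) : List (String × String × String) :=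
  triples.foldl (fun converted_triples hrt =>
    let h := hrt.1
    let r := hrt.2.1
    let t := hrt.2.2
    let h_text :=
      if h < num_tokens then
        ((PySem.Dict.mk node_id_to_token).get? h).getD ("UNK_" ++ PySem.Int.toStr h)
      else
        let token_indices := ((PySem.Dict.mk span_id_to_token_indices).get? h).getD []
        PySem.Str.join " " (token_indices.map (fun idx => ((PySem.Dict.mk node_id_to_token).get? idx).getD ("UNK_" ++ PySem.Int.toStr idx)))
    let t_text :=
      if t < num_tokens then
        ((PySem.Dict.mk node_id_to_token).get? t).getD ("UNK_" ++ PySem.Int.toStr t)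
      else
        let token_indices := ((PySem.Dict.mk span_id_to_token_indices).get? t).getD []
        PySem.Str.join " " (token_indices.map (fun idx => ((PySem.Dict.mk node_id_to_token).get? idx).getD ("UNK_" ++ PySem.Int.toStr idx)))
    let r_text := ((PySem.Dict.mk node_id_to_token).get? r).getD ("UNK_" ++ PySem.Int.toStr r)
    converted_triples ++ [(h_text, r_text, t_text)]) []

-- ===== PORT B =====
-- Source B's resolve(i)
def pvResolveB (node_id_to_token : List (Int × String)) (span_id_to_token_indices : List (Int × List Int)) (num_tokens : Int) (i : Int) : String :=
  if i < num_tokens then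
    ((PySem.Dict.mk node_id_to_token).get? i).getD ("UNK_" ++ PySem.Int.toStr i)
  else
    PySem.Str.join " " ((((PySem.Dict.mk span_id_to_token_indices).get? i).getD []).map
      (fun idx => ((PySem.Dict.mk node_id_to_token).get? idx).getD ("UNK_" ++ PySem.Int.toStr idx)))

-- Source B's first pass: build the table over the distinct head/tail ids
def pvTableB (triples : List (Int × Int × Int)) (node_id_to_token : List (Int × String)) (span_id_to_token_indices : List (Int × List Int)) (num_tokens : Int) : PySem.Dict Int String :=
  triples.foldl (fun d hrt =>
    let d' := if d.contains hrt.1 then d else d.insert hrt.1 (pvResolveB node_id_to_token span_id_to_token_indices num_tokens hrt.1)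
    if d'.contains hrt.2.2 then d' else d'.insert hrt.2.2 (pvResolveB node_id_to_token span_id_to_token_indices num_tokens hrt.2.2))
    PySem.Dict.empty

def convert_span_triples_to_text_alt (triples : List (Int × Int × Int)) (node_id_to_token : List (Int × String)) (span_id_to_token_indices : List (Int × List Int)) (num_tokens : Int) : List (String × String × String) :=
  let table := pvTableB triples node_id_to_token span_id_to_token_indices num_tokens
  -- table[h] / table[t]: the key is always present (inserted in the first pass),
  -- so the getD "" default is never used; exact for Python's table[h].
  triples.map (fun hrt =>
    ((table.get? hrt.1).getD "",
     ((PySem.Dict.mk node_id_to_token).get? hrt.2.1).getD ("UNK_" ++ PySem.Int.toStr hrt.2.1),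
     (table.get? hrt.2.2).getD ""))

-- ===== PRECONDITION & SPEC =====
def Spec_convert_span_triples_to_text (triples : List (Int × Int × Int)) (node_id_to_token : List (Int × String)) (span_id_to_token_indices : List (Int × List Int)) (num_tokens : Int) (out : List (String × String × String)) : Prop := out = convert_span_triples_to_text_alt triples node_id_to_token span_id_to_token_indices num_tokens
instance (triples : List (Int × Int × Int)) (node_id_to_token : List (Int × String)) (span_id_to_token_indices : List (Int × List Int)) (num_tokens : Int) (out : List (String × String × String)) : Decidable (Spec_convert_span_triples_to_text triples node_id_to_token span_id_to_token_indices num_tokens out) := by unfold Spec_convert_span_triples_to_text; infer_instance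

-- ===== CLAIM (what is proved, stated in full; the proofs are below) =====
def Claim_equal_convert_span_triples_to_text : Prop := ∀ (triples : List (Int × Int × Int)) (node_id_to_token : List (Int × String)) (span_id_to_token_indices : List (Int × List Int)) (num_tokens : Int), Dom_convert_span_triples_to_text triples node_id_to_token span_id_to_token_indices num_tokens → Spec_convert_span_triples_to_text triples node_id_to_token span_id_to_token_indices num_tokens (convert_span_triples_to_text triples node_id_to_token span_id_to_token_indices num_tokens)

-- ===== LEMMAS AND PROOFS =====

-- A's append-loop is a map
theorem foldl_append_singleton {α β : Type} (f : α → β) (l : List α) (acc : List β) :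
    l.foldl (fun a x => a ++ [f x]) acc = acc ++ l.map f := by
  induction l generalizing acc with
  | nil => simp
  | cons x xs ih => simp [List.foldl_cons, ih]

-- every value stored in B's table is resolve of its key
theorem table_sound (node_id_to_token : List (Int × String)) (span_id_to_token_indices : List (Int × List Int)) (num_tokens : Int)
    (l : List (Int × Int × Int)) (d : PySem.Dict Int String)
    (hd : ∀ k v, d.get? k = some v → v = pvResolveB node_id_to_token span_id_to_token_indices num_tokens k) :
    ∀ k v, (l.foldl (fun d hrt =>
      let d' := if d.contains hrt.1 then d else d.insert hrt.1 (pvResolveB node_id_to_token span_id_to_token_indices num_tokens hrt.1)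
      if d'.contains hrt.2.2 then d' else d'.insert hrt.2.2 (pvResolveB node_id_to_token span_id_to_token_indices num_tokens hrt.2.2)) d).get? k = some v →
      v = pvResolveB node_id_to_token span_id_to_token_indices num_tokens k := by
  induction l generalizing d with
  | nil => exact hd
  | cons x xs ih =>
      intro k v
      apply ih
      intro k' v' h'
      have step : ∀ (e : PySem.Dict Int String) (j : Int),
          (∀ k v, e.get? k = some v → v = pvResolveB node_id_to_token span_id_to_token_indices num_tokens k) →
          ∀ k v, ((if e.contains j then e else e.insert j (pvResolveB node_id_to_token span_id_to_token_indices num_tokens j)).get? k = some v) →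
            v = pvResolveB node_id_to_token span_id_to_token_indices num_tokens k := by
        intro e j he k v hkv
        split at hkv
        · exact he k v hkv
        · rw [PySem.Dict.get?_insert] at hkv
          split at hkv
          · cases hkv; subst ‹k = j›; rfl
          · exact he k v hkv
      exact step _ x.2.2 (step _ x.1 hd) k' v' h'

theorem contains_step (e : PySem.Dict Int String) (j k : Int) (f : Int → String)
    (h : e.contains k = true) :
    (if e.contains j then e else e.insert j (f j)).contains k = true := by
  split
  · exact h
  · simp [PySem.Dict.contains_insert, h]

theorem contains_step_self (e : PySem.Dict Int String) (j : Int) (f : Int → String) :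
    (if e.contains j then e else e.insert j (f j)).contains j = true := by
  split
  · assumption
  · simp

theorem contains_foldl_mono (node_id_to_token : List (Int × String)) (span_id_to_token_indices : List (Int × List Int)) (num_tokens : Int)
    (l : List (Int × Int × Int)) (d : PySem.Dict Int String) (k : Int)
    (h : d.contains k = true) :
    (l.foldl (fun d hrt =>
      let d' := if d.contains hrt.1 then d else d.insert hrt.1 (pvResolveB node_id_to_token span_id_to_token_indices num_tokens hrt.1)
      if d'.contains hrt.2.2 then d' else d'.insert hrt.2.2 (pvResolveB node_id_to_token span_id_to_token_indices num_tokens hrt.2.2)) d).contains k = true := by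
  induction l generalizing d with
  | nil => exact h
  | cons y ys ih =>
      apply ih
      exact contains_step _ y.2.2 k _ (contains_step _ y.1 k _ h)

-- every head/tail id of the triples is a key of B's table
theorem table_complete (node_id_to_token : List (Int × String)) (span_id_to_token_indices : List (Int × List Int)) (num_tokens : Int)
    (l : List (Int × Int × Int)) (d : PySem.Dict Int String) :
    ∀ x ∈ l, ((l.foldl (fun d hrt =>
      let d' := if d.contains hrt.1 then d else d.insert hrt.1 (pvResolveB node_id_to_token span_id_to_token_indices num_tokens hrt.1)
      if d'.contains hrt.2.2 then d' else d'.insert hrt.2.2 (pvResolveB node_id_to_token span_id_to_token_indices num_tokens hrt.2.2)) d).contains x.1 = true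
      ∧ (l.foldl (fun d hrt =>
      let d' := if d.contains hrt.1 then d else d.insert hrt.1 (pvResolveB node_id_to_token span_id_to_token_indices num_tokens hrt.1)
      if d'.contains hrt.2.2 then d' else d'.insert hrt.2.2 (pvResolveB node_id_to_token span_id_to_token_indices num_tokens hrt.2.2)) d).contains x.2.2 = true) := by
  induction l generalizing d with
  | nil => intro x hx; cases hx
  | cons y ys ih =>
      intro x hx
      rcases List.mem_cons.mp hx with hx | hx
      · subst hx
        -- after the first step, x.1 and x.2.2 are keys; the rest preserves keys
        have h1 : ((if (d.contains x.1 : Bool) then d else d.insert x.1 (pvResolveB node_id_to_token span_id_to_token_indices num_tokens x.1))).contains x.1 = true :=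
          contains_step_self _ _ _
        have base1 := contains_step _ x.2.2 x.1 (pvResolveB node_id_to_token span_id_to_token_indices num_tokens) h1
        have base2 := contains_step_self (if (d.contains x.1 : Bool) then d else d.insert x.1 (pvResolveB node_id_to_token span_id_to_token_indices num_tokens x.1)) x.2.2 (pvResolveB node_id_to_token span_id_to_token_indices num_tokens)
        constructor
        · exact contains_foldl_mono node_id_to_token span_id_to_token_indices num_tokens ys _ _ base1
        · exact contains_foldl_mono node_id_to_token span_id_to_token_indices num_tokens ys _ _ base2
      · exact ih _ x hx

-- ===== VERDICT (by name: the statement is the Claim_ definition above) =====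
theorem convert_span_triples_to_text_spec : Claim_equal_convert_span_triples_to_text := by
  intro triples node_id_to_token span_id_to_token_indices num_tokens _
  unfold Spec_convert_span_triples_to_text convert_span_triples_to_text convert_span_triples_to_text_alt
  rw [foldl_append_singleton]
  simp only [List.nil_append]
  apply List.map_congr_left
  intro x hx
  obtain ⟨h1, h2⟩ := table_complete node_id_to_token span_id_to_token_indices num_tokens triples PySem.Dict.empty x hx
  have sound := table_sound node_id_to_token span_id_to_token_indices num_tokens triples PySem.Dict.empty
    (by intro k v hv; simp [PySem.Dict.get?_empty] at hv)
  rw [PySem.Dict.contains_eq_isSome_get?] at h1 h2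
  obtain ⟨v1, hv1⟩ := Option.isSome_iff_exists.mp h1
  obtain ⟨v2, hv2⟩ := Option.isSome_iff_exists.mp h2
  have e1 := sound x.1 v1 hv1
  have e2 := sound x.2.2 v2 hv2
  show _ = ((((pvTableB triples node_id_to_token span_id_to_token_indices num_tokens).get? x.1).getD ""), _, _)
  unfold pvTableB
  rw [hv1, hv2]
  simp only [Option.getD_some]
  rw [e1, e2]
  rfl
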